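-- pv_equiv track=rewrite | github.com/codenameyizzz/numbrixSolver | Board.py | get_all_coordinates_at_distance
-- ===== SOURCE A (Python) =====
-- def get_all_coordinates_at_distance(row, col, distance):
--     """Return all feasible coordinates in a board which have a Manhattan Distance of `distance` from the location given
--     by (row, col)."""
--     coordinates = set()
--
--     if distance <= 0:
--         return coordinates
--
--     pairs = [(x, distance - x) for x in range(distance + 1)]
--     for quadrant_multiplier in ((1, 1), (1, -1), (-1, 1), (-1, -1)):
--         row_multiplier, col_multiplier = quadrant_multiplier
--         for row_pair_part, col_pair_part in pairs:
--             r = row + (row_pair_part * row_multiplier)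
--             c = col + (col_pair_part * col_multiplier)
--             if 0 <= r < 9 and 0 <= c < 9:
--                 coordinates.add((r, c))
--
--     return coordinates
-- ===== SOURCE B (Python) =====
-- def get_all_coordinates_at_distance(row, col, distance):
--     """Return all feasible coordinates in a board which have a Manhattan Distance of `distance` from the location given
--     by (row, col)."""
--     if distance <= 0:
--         return set()
--     d = distance
--     ring = (
--         [(row + x, col + d - x) for x in range(max(0, -row, col + d - 8), min(d, 8 - row, col + d) + 1)]
--         + [(row + x, col + x - d) for x in range(max(0, -row, d - col), min(d - 1, 8 - row, d - col + 8) + 1)]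
--         + [(row - x, col + d - x) for x in range(max(1, row - 8, col + d - 8), min(d, row, col + d) + 1)]
--         + [(row - x, col + x - d) for x in range(max(1, row - 8, d - col), min(d - 1, row, d - col + 8) + 1)]
--     )
--     return set(ring)
-- ===== Notes on version B (the rewrite author's own statement) =====
-- stated objective: faster
-- what changed: A enumerates all 4*(distance+1) candidate points quadrant by quadrant and deduplicates overlaps via the set; B computes, in closed form, the clamped index interval of each of the four overlap-free diamond edges that lies on the 9x9 board and enumerates only those at most 32 points.
import Mathlib
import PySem

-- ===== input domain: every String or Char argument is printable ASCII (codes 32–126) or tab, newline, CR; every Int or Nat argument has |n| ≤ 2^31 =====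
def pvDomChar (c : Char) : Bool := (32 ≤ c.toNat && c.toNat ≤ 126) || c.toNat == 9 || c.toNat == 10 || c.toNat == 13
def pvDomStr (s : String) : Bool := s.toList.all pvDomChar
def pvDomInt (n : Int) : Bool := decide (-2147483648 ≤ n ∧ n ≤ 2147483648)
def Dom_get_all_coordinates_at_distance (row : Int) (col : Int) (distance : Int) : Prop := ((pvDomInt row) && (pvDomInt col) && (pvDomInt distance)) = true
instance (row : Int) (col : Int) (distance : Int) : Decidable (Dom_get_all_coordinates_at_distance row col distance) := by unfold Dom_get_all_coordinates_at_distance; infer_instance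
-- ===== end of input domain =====

-- B replaces A's four-quadrant enumeration of all 4·(distance+1) candidate points (with set dedup)
-- by four closed-form board-clamped edge segments of the diamond (objective: faster for large distance).

-- ===== PORT A =====
def get_all_coordinates_at_distance (row : Int) (col : Int) (distance : Int) : List (Int × Int) :=
  let coordinates : PySem.Set (Int × Int) := PySem.Set.empty
  if distance ≤ 0 then coordinates
  else
    let pairs : List (Int × Int) := (PySem.List.pyRange 0 (distance + 1)).map (fun x => (x, distance - x))
    [((1 : Int), (1 : Int)), (1, -1), (-1, 1), (-1, -1)].foldl
      (fun coordinates qm =>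
        pairs.foldl
          (fun coordinates pr =>
            let r := row + pr.1 * qm.1
            let c := col + pr.2 * qm.2
            if 0 ≤ r ∧ r < 9 ∧ 0 ≤ c ∧ c < 9 then PySem.Set.add coordinates (r, c) else coordinates)
          coordinates)
      coordinates

-- ===== PORT B =====
def get_all_coordinates_at_distance_alt (row : Int) (col : Int) (distance : Int) : List (Int × Int) :=
  if distance ≤ 0 then PySem.Set.empty
  else
    let d := distance
    let ring : List (Int × Int) :=
      (PySem.List.pyRange (max (max 0 (-row)) (col + d - 8)) (min (min d (8 - row)) (col + d) + 1)).map
          (fun x => (row + x, col + d - x))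
      ++ (PySem.List.pyRange (max (max 0 (-row)) (d - col)) (min (min (d - 1) (8 - row)) (d - col + 8) + 1)).map
          (fun x => (row + x, col + x - d))
      ++ (PySem.List.pyRange (max (max 1 (row - 8)) (col + d - 8)) (min (min d row) (col + d) + 1)).map
          (fun x => (row - x, col + d - x))
      ++ (PySem.List.pyRange (max (max 1 (row - 8)) (d - col)) (min (min (d - 1) row) (d - col + 8) + 1)).map
          (fun x => (row - x, col + x - d))
    PySem.Set.ofList ring

-- ===== PRECONDITION & SPEC =====
def Spec_get_all_coordinates_at_distance (row : Int) (col : Int) (distance : Int) (out : List (Int × Int)) : Prop := out = get_all_coordinates_at_distance_alt row col distance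
instance (row : Int) (col : Int) (distance : Int) (out : List (Int × Int)) : Decidable (Spec_get_all_coordinates_at_distance row col distance out) := by unfold Spec_get_all_coordinates_at_distance; infer_instance

-- ===== CLAIM (what is proved, stated in full; the proofs are below) =====
def Claim_equal_get_all_coordinates_at_distance : Prop := ∀ (row : Int) (col : Int) (distance : Int), Dom_get_all_coordinates_at_distance row col distance → Spec_get_all_coordinates_at_distance row col distance (get_all_coordinates_at_distance row col distance)

-- ===== LEMMAS AND PROOFS =====

-- the in-board test and the four overlap-free edges of the Manhattan diamond of radius d
def pvPB (y : Int × Int) : Bool := decide (0 ≤ y.1 ∧ y.1 < 9 ∧ 0 ≤ y.2 ∧ y.2 < 9)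
def pvE1 (row col d : Int) : List (Int × Int) := (PySem.List.pyRange 0 (d + 1)).map (fun x => (row + x, col + d - x))
def pvE2 (row col d : Int) : List (Int × Int) := (PySem.List.pyRange 0 (d + 1)).map (fun x => (row + x, col + x - d))
def pvE3 (row col d : Int) : List (Int × Int) := (PySem.List.pyRange 0 (d + 1)).map (fun x => (row - x, col + d - x))
def pvE4 (row col d : Int) : List (Int × Int) := (PySem.List.pyRange 0 (d + 1)).map (fun x => (row - x, col + x - d))
def pvT2 (row col d : Int) : List (Int × Int) := (PySem.List.pyRange 0 d).map (fun x => (row + x, col + x - d))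
def pvT3 (row col d : Int) : List (Int × Int) := (PySem.List.pyRange 1 (d + 1)).map (fun x => (row - x, col + d - x))
def pvT4 (row col d : Int) : List (Int × Int) := (PySem.List.pyRange 1 d).map (fun x => (row - x, col + x - d))
def pvRing (row col d : Int) : List (Int × Int) := pvE1 row col d ++ pvT2 row col d ++ pvT3 row col d ++ pvT4 row col d

lemma pvRange_nil {a b : Int} (h : b ≤ a) : PySem.List.pyRange a b = [] := by
  simp [PySem.List.pyRange, show ¬ (a < b) by omega]

lemma pvRange_pairwise (n : Nat) : ∀ a b : Int, (b - a).toNat ≤ n → (PySem.List.pyRange a b).Pairwise (· < ·) := by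
  induction n with
  | zero => intro a b h; rw [pvRange_nil (by omega)]; exact List.Pairwise.nil
  | succ n ih =>
    intro a b h
    by_cases hab : a < b
    · rw [PySem.List.pyRange_one_cons hab]
      refine List.Pairwise.cons ?_ (ih (a+1) b (by omega))
      intro y hy
      have := PySem.List.mem_pyRange_one.mp hy
      omega
    · rw [pvRange_nil (by omega)]; exact List.Pairwise.nil

lemma pvRange_nodup (a b : Int) : (PySem.List.pyRange a b).Nodup :=
  (pvRange_pairwise (b - a).toNat a b le_rfl).imp (fun h => ne_of_lt h)

lemma pvNodupMap (a b : Int) (f : Int → Int × Int) (hf : ∀ x y, f x = f y → x = y) :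
    ((PySem.List.pyRange a b).map f).Nodup :=
  (pvRange_nodup a b).map (fun _ _ h => hf _ _ h)

-- a step-1 range filtered by an interval membership test is the clamped range
lemma pvFilter_pyRange (n : Nat) : ∀ a b lo hi : Int, (b - a).toNat ≤ n →
    (PySem.List.pyRange a b).filter (fun x => decide (lo ≤ x ∧ x < hi)) = PySem.List.pyRange (max a lo) (min b hi) := by
  induction n with
  | zero =>
    intro a b lo hi h
    rw [pvRange_nil (by omega), pvRange_nil (by omega)]; rfl
  | succ n ih =>
    intro a b lo hi h
    by_cases hab : a < b
    · rw [PySem.List.pyRange_one_cons hab, List.filter_cons]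
      by_cases hc : lo ≤ a ∧ a < hi
      · rw [if_pos (by simpa using hc)]
        rw [ih (a+1) b lo hi (by omega)]
        have h1 : max (a+1) lo = a + 1 := by omega
        have h2 : max a lo = a := by omega
        rw [h1, h2]
        exact (PySem.List.pyRange_one_cons (by omega)).symm
      · rw [if_neg (by simpa using hc)]
        rw [ih (a+1) b lo hi (by omega)]
        rcases not_and_or.mp hc with hlo | hhi
        · have h1 : max (a+1) lo = max a lo := by omega
          rw [h1]
        · rw [pvRange_nil (by omega), pvRange_nil (by omega)]
    · rw [pvRange_nil (by omega), pvRange_nil (by omega)]; rfl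

-- a loop 'for pr in l: if p(f(pr)): s.add(f(pr))' is an update by the filtered mapped list
lemma pvGfoldMap {β : Type} (p : Int × Int → Prop) [DecidablePred p] (f : β → Int × Int) :
    ∀ (l : List β) (s : PySem.Set (Int × Int)),
      l.foldl (fun s x => if p (f x) then s.add (f x) else s) s
        = s.update ((l.map f).filter (fun y => decide (p y))) := by
  intro l
  induction l with
  | nil => intro s; simp [PySem.Set.update]
  | cons x xs ih =>
    intro s
    simp only [List.foldl_cons, List.map_cons, List.filter_cons]
    by_cases hp : p (f x)
    · rw [if_pos hp, if_pos (by simpa using hp), PySem.Set.update_cons, ih]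
    · rw [if_neg hp, if_neg (by simpa using hp), ih]

-- A's inner quadrant loop, in the exact shape it has after unfolding
lemma pvQuad (row col rm cm : Int) (l : List (Int × Int)) (s : PySem.Set (Int × Int)) :
    l.foldl (fun s pr =>
        let r := row + pr.1 * rm
        let c := col + pr.2 * cm
        if 0 ≤ r ∧ r < 9 ∧ 0 ≤ c ∧ c < 9 then PySem.Set.add s (r, c) else s) s
      = s.update ((l.map (fun pr => (row + pr.1 * rm, col + pr.2 * cm))).filter pvPB) :=
  pvGfoldMap (fun y => 0 ≤ y.1 ∧ y.1 < 9 ∧ 0 ≤ y.2 ∧ y.2 < 9) (fun pr => (row + pr.1 * rm, col + pr.2 * cm)) l s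

lemma pvOfListFilter {α : Type} [BEq α] [LawfulBEq α] (p : α → Bool) :
    ∀ xs : List α, PySem.Set.ofList (xs.filter p) = (PySem.Set.ofList xs).filter p := by
  intro xs
  induction xs with
  | nil => rfl
  | cons x xs ih =>
    rw [List.filter_cons, PySem.Set.ofList_cons]
    by_cases hp : p x = true
    · rw [if_pos (by simpa using hp), PySem.Set.ofList_cons, ih, List.filter_cons, if_pos (by simpa using hp)]
      congr 1
      simp only [PySem.Set.discard, List.filter_filter]
      exact List.filter_congr (fun a _ => Bool.and_comm _ _)
    · rw [if_neg (by simpa using hp), ih, List.filter_cons, if_neg (by simpa using hp)]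
      simp only [PySem.Set.discard, List.filter_filter]
      refine (List.filter_congr ?_).symm
      intro a _
      by_cases hax : a = x
      · subst hax; simp [hp]
      · simp [hax]

-- no-duplication facts for the four edges
lemma pvND1 (row col d : Int) : (pvE1 row col d).Nodup :=
  pvNodupMap _ _ _ (by intro x y hxy; simp [Prod.mk.injEq] at hxy; omega)
lemma pvNDT2 (row col d : Int) : (pvT2 row col d).Nodup :=
  pvNodupMap _ _ _ (by intro x y hxy; simp [Prod.mk.injEq] at hxy; omega)
lemma pvNDT3 (row col d : Int) : (pvT3 row col d).Nodup :=
  pvNodupMap _ _ _ (by intro x y hxy; simp [Prod.mk.injEq] at hxy; omega)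
lemma pvNDT4 (row col d : Int) : (pvT4 row col d).Nodup :=
  pvNodupMap _ _ _ (by intro x y hxy; simp [Prod.mk.injEq] at hxy; omega)
lemma pvDJ2 (row col d : Int) : ∀ y ∈ pvT2 row col d, y ∉ pvE1 row col d := by
  intro y hy
  simp only [pvT2, List.mem_map, PySem.List.mem_pyRange_one] at hy
  obtain ⟨x, hx, rfl⟩ := hy
  simp only [pvE1, List.mem_map, PySem.List.mem_pyRange_one, Prod.mk.injEq, not_exists, not_and]
  omega
lemma pvDJ3 (row col d : Int) : ∀ y ∈ pvT3 row col d, y ∉ pvE1 row col d ++ pvT2 row col d := by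
  intro y hy
  simp only [pvT3, List.mem_map, PySem.List.mem_pyRange_one] at hy
  obtain ⟨x, hx, rfl⟩ := hy
  simp only [pvE1, pvT2, List.mem_append, List.mem_map, PySem.List.mem_pyRange_one, Prod.mk.injEq,
    not_or, not_exists, not_and]
  constructor <;> omega
lemma pvDJ4 (row col d : Int) : ∀ y ∈ pvT4 row col d, y ∉ (pvE1 row col d ++ pvT2 row col d) ++ pvT3 row col d := by
  intro y hy
  simp only [pvT4, List.mem_map, PySem.List.mem_pyRange_one] at hy
  obtain ⟨x, hx, rfl⟩ := hy
  simp only [pvE1, pvT2, pvT3, List.mem_append, List.mem_map, PySem.List.mem_pyRange_one,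
    Prod.mk.injEq, not_or, not_exists, not_and]
  refine ⟨⟨?_, ?_⟩, ?_⟩ <;> omega

lemma pvRing_nodup (row col d : Int) : (pvRing row col d).Nodup :=
  (((pvND1 row col d).append (pvNDT2 row col d) (List.disjoint_right.mpr (pvDJ2 row col d))).append
      (pvNDT3 row col d) (List.disjoint_right.mpr (pvDJ3 row col d))).append
    (pvNDT4 row col d) (List.disjoint_right.mpr (pvDJ4 row col d))

-- set(E1 + E2 + E3 + E4) keeps, in order, exactly the overlap-free ring
lemma pvOfListBig (row col d : Int) (h : 0 < d) :
    PySem.Set.ofList (pvE1 row col d ++ pvE2 row col d ++ pvE3 row col d ++ pvE4 row col d) = pvRing row col d := by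
  have hm2 : ((row + d, col + d - d) : Int × Int) ∈ pvE1 row col d := by
    simp only [pvE1, List.mem_map, PySem.List.mem_pyRange_one]
    exact ⟨d, by omega, rfl⟩
  have hm3 : ((row - 0, col + d - 0) : Int × Int) ∈ pvE1 row col d := by
    simp only [pvE1, List.mem_map, PySem.List.mem_pyRange_one]
    exact ⟨0, by omega, by simp⟩
  have hm4 : ((row - 0, col + 0 - d) : Int × Int) ∈ pvT2 row col d := by
    simp only [pvT2, List.mem_map, PySem.List.mem_pyRange_one]
    exact ⟨0, by omega, by simp⟩
  have hm4' : ((row - d, col + d - d) : Int × Int) ∈ pvT3 row col d := by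
    simp only [pvT3, List.mem_map, PySem.List.mem_pyRange_one]
    exact ⟨d, by omega, rfl⟩
  have hsplit2 : pvE2 row col d = pvT2 row col d ++ [(row + d, col + d - d)] := by
    simp only [pvE2, pvT2]
    rw [PySem.List.pyRange_one_succ_right (by omega), List.map_append]
    rfl
  have hsplit3 : pvE3 row col d = (row - 0, col + d - 0) :: pvT3 row col d := by
    simp only [pvE3, pvT3]
    rw [PySem.List.pyRange_one_cons (by omega)]
    rfl
  have hsplit4 : pvE4 row col d = (row - 0, col + 0 - d) :: (pvT4 row col d ++ [(row - d, col + d - d)]) := by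
    simp only [pvE4, pvT4]
    rw [PySem.List.pyRange_one_cons (by omega : (0:Int) < d + 1)]
    simp only [zero_add]
    rw [PySem.List.pyRange_one_succ_right (by omega : (1:Int) ≤ d)]
    simp
  rw [PySem.Set.ofList_append, PySem.Set.ofList_append, PySem.Set.ofList_append]
  rw [PySem.Set.ofList_eq_self_of_nodup _ (pvND1 row col d)]
  rw [hsplit2, PySem.Set.update_append,
    PySem.Set.update_eq_append_of_disjoint _ _ (pvNDT2 row col d) (pvDJ2 row col d)]
  rw [PySem.Set.update_cons, PySem.Set.add_of_mem (List.mem_append_left _ hm2), PySem.Set.update_nil]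
  rw [hsplit3, PySem.Set.update_cons, PySem.Set.add_of_mem (List.mem_append_left _ hm3),
    PySem.Set.update_eq_append_of_disjoint _ _ (pvNDT3 row col d) (pvDJ3 row col d)]
  rw [hsplit4, PySem.Set.update_cons,
    PySem.Set.add_of_mem (List.mem_append_left _ (List.mem_append_right _ hm4)),
    PySem.Set.update_append,
    PySem.Set.update_eq_append_of_disjoint _ _ (pvNDT4 row col d) (pvDJ4 row col d),
    PySem.Set.update_cons, PySem.Set.add_of_mem (List.mem_append_left _ (List.mem_append_right _ hm4')),
    PySem.Set.update_nil]
  simp [pvRing, List.append_assoc]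

-- A's accumulated set is the in-board filter of the overlap-free ring
lemma pvA_eq (row col d : Int) (h : 0 < d) :
    get_all_coordinates_at_distance row col d = (pvRing row col d).filter pvPB := by
  unfold get_all_coordinates_at_distance
  rw [if_neg (by omega)]
  simp only [List.foldl_cons, List.foldl_nil]
  rw [pvQuad, pvQuad, pvQuad, pvQuad]
  simp only [List.map_map]
  have g1 : ((fun pr : Int × Int => (row + pr.1 * 1, col + pr.2 * 1)) ∘ (fun x : Int => (x, d - x)))
      = (fun x : Int => (row + x, col + d - x)) := by
    funext x; simp only [Function.comp_apply, Prod.mk.injEq]; constructor <;> ring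
  have g2 : ((fun pr : Int × Int => (row + pr.1 * 1, col + pr.2 * -1)) ∘ (fun x : Int => (x, d - x)))
      = (fun x : Int => (row + x, col + x - d)) := by
    funext x; simp only [Function.comp_apply, Prod.mk.injEq]; constructor <;> ring
  have g3 : ((fun pr : Int × Int => (row + pr.1 * -1, col + pr.2 * 1)) ∘ (fun x : Int => (x, d - x)))
      = (fun x : Int => (row - x, col + d - x)) := by
    funext x; simp only [Function.comp_apply, Prod.mk.injEq]; constructor <;> ring
  have g4 : ((fun pr : Int × Int => (row + pr.1 * -1, col + pr.2 * -1)) ∘ (fun x : Int => (x, d - x)))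
      = (fun x : Int => (row - x, col + x - d)) := by
    funext x; simp only [Function.comp_apply, Prod.mk.injEq]; constructor <;> ring
  rw [g1, g2, g3, g4]
  rw [show PySem.Set.empty.update (List.filter pvPB (List.map (fun x : Int => (row + x, col + d - x)) (PySem.List.pyRange 0 (d+1)))) = PySem.Set.ofList (List.filter pvPB (List.map (fun x : Int => (row + x, col + d - x)) (PySem.List.pyRange 0 (d+1)))) from PySem.Set.update_empty _]
  rw [← PySem.Set.ofList_append, ← PySem.Set.ofList_append, ← PySem.Set.ofList_append]
  rw [← List.filter_append, ← List.filter_append, ← List.filter_append]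
  rw [show List.map (fun x : Int => (row + x, col + d - x)) (PySem.List.pyRange 0 (d+1)) ++ List.map (fun x : Int => (row + x, col + x - d)) (PySem.List.pyRange 0 (d+1)) ++ List.map (fun x : Int => (row - x, col + d - x)) (PySem.List.pyRange 0 (d+1)) ++ List.map (fun x : Int => (row - x, col + x - d)) (PySem.List.pyRange 0 (d+1)) = pvE1 row col d ++ pvE2 row col d ++ pvE3 row col d ++ pvE4 row col d from rfl]
  rw [pvOfListFilter, pvOfListBig row col d h]

-- each filtered edge is the clamped segment B enumerates
lemma pvSeg (a b : Int) (f : Int → Int × Int) (lo hi : Int)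
    (hp : ∀ x : Int, pvPB (f x) = decide (lo ≤ x ∧ x < hi)) :
    ((PySem.List.pyRange a b).map f).filter pvPB
      = (PySem.List.pyRange (max a lo) (min b hi)).map f := by
  rw [List.filter_map]
  simp only [Function.comp_def]
  rw [List.filter_congr (fun x _ => hp x)]
  rw [pvFilter_pyRange (b - a).toNat a b lo hi le_rfl]

lemma pvB_eq (row col d : Int) (h : 0 < d) :
    get_all_coordinates_at_distance_alt row col d = (pvRing row col d).filter pvPB := by
  unfold get_all_coordinates_at_distance_alt
  rw [if_neg (by omega)]
  show PySem.Set.ofList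
      ((PySem.List.pyRange (max (max 0 (-row)) (col + d - 8)) (min (min d (8 - row)) (col + d) + 1)).map
          (fun x => (row + x, col + d - x))
        ++ (PySem.List.pyRange (max (max 0 (-row)) (d - col)) (min (min (d - 1) (8 - row)) (d - col + 8) + 1)).map
          (fun x => (row + x, col + x - d))
        ++ (PySem.List.pyRange (max (max 1 (row - 8)) (col + d - 8)) (min (min d row) (col + d) + 1)).map
          (fun x => (row - x, col + d - x))
        ++ (PySem.List.pyRange (max (max 1 (row - 8)) (d - col)) (min (min (d - 1) row) (d - col + 8) + 1)).map
          (fun x => (row - x, col + x - d)))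
      = (pvRing row col d).filter pvPB
  have s1 : (pvE1 row col d).filter pvPB
      = (PySem.List.pyRange (max (max 0 (-row)) (col + d - 8)) (min (min d (8 - row)) (col + d) + 1)).map
          (fun x => (row + x, col + d - x)) := by
    unfold pvE1
    rw [pvSeg 0 (d+1) _ (max (-row) (col + d - 8)) (min (8 - row) (col + d) + 1)
      (by intro x; simp only [pvPB, decide_eq_decide]; omega)]
    rw [show max 0 (max (-row) (col + d - 8)) = max (max 0 (-row)) (col + d - 8) by omega,
      show min (d+1) (min (8 - row) (col + d) + 1) = min (min d (8 - row)) (col + d) + 1 by omega]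
  have s2 : (pvT2 row col d).filter pvPB
      = (PySem.List.pyRange (max (max 0 (-row)) (d - col)) (min (min (d - 1) (8 - row)) (d - col + 8) + 1)).map
          (fun x => (row + x, col + x - d)) := by
    unfold pvT2
    rw [pvSeg 0 d _ (max (-row) (d - col)) (min (8 - row) (d - col + 8) + 1)
      (by intro x; simp only [pvPB, decide_eq_decide]; omega)]
    rw [show max 0 (max (-row) (d - col)) = max (max 0 (-row)) (d - col) by omega,
      show min d (min (8 - row) (d - col + 8) + 1) = min (min (d - 1) (8 - row)) (d - col + 8) + 1 by omega]
  have s3 : (pvT3 row col d).filter pvPB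
      = (PySem.List.pyRange (max (max 1 (row - 8)) (col + d - 8)) (min (min d row) (col + d) + 1)).map
          (fun x => (row - x, col + d - x)) := by
    unfold pvT3
    rw [pvSeg 1 (d+1) _ (max (row - 8) (col + d - 8)) (min row (col + d) + 1)
      (by intro x; simp only [pvPB, decide_eq_decide]; omega)]
    rw [show max 1 (max (row - 8) (col + d - 8)) = max (max 1 (row - 8)) (col + d - 8) by omega,
      show min (d+1) (min row (col + d) + 1) = min (min d row) (col + d) + 1 by omega]
  have s4 : (pvT4 row col d).filter pvPB
      = (PySem.List.pyRange (max (max 1 (row - 8)) (d - col)) (min (min (d - 1) row) (d - col + 8) + 1)).map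
          (fun x => (row - x, col + x - d)) := by
    unfold pvT4
    rw [pvSeg 1 d _ (max (row - 8) (d - col)) (min row (d - col + 8) + 1)
      (by intro x; simp only [pvPB, decide_eq_decide]; omega)]
    rw [show max 1 (max (row - 8) (d - col)) = max (max 1 (row - 8)) (d - col) by omega,
      show min d (min row (d - col + 8) + 1) = min (min (d - 1) row) (d - col + 8) + 1 by omega]
  rw [← s1, ← s2, ← s3, ← s4]
  rw [← List.filter_append, ← List.filter_append, ← List.filter_append]
  rw [show pvE1 row col d ++ pvT2 row col d ++ pvT3 row col d ++ pvT4 row col d = pvRing row col d from rfl]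
  rw [pvOfListFilter, PySem.Set.ofList_eq_self_of_nodup _ (pvRing_nodup row col d)]

-- ===== VERDICT (by name: the statement is the Claim_ definition above) =====
theorem get_all_coordinates_at_distance_spec : Claim_equal_get_all_coordinates_at_distance := by
  intro row col d _
  unfold Spec_get_all_coordinates_at_distance
  by_cases h : d ≤ 0
  · simp [get_all_coordinates_at_distance, get_all_coordinates_at_distance_alt, h]
  · rw [pvA_eq row col d (by omega), pvB_eq row col d (by omega)]
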